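-- pv_equiv track=rewrite | github.com/sjystone/Algorithm | Search/AStar/AStarNDigit.py | reorder_num
-- ===== SOURCE A (Python) =====
-- STR = 'a'
--
-- def reorder_num(str, strTarget):
--     """通过逆序对的数量判断问题是否有解"""
--     reorderNumInit, reorderNumTarget = 0, 0
--     for i in range(len(str)):
--         for j in range(i + 1, len(str)):
--             if str[i] != STR and str[j] != STR and str[i] > str[j]:
--                 reorderNumInit += 1
--             if strTarget[i] != STR and strTarget[j] != STR and strTarget[i] > strTarget[j]:
--                 reorderNumTarget += 1
--     return reorderNumInit % 2 == reorderNumTarget % 2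
-- ===== SOURCE B (Python) =====
-- STR = 'a'
--
-- def reorder_num(str, strTarget):
--     """Compare inversion-count parity of the two strings (ignoring 'a'),
--     in one pass per string with a character counter instead of the double loop."""
--     def inv_parity(s):
--         cnt = {}
--         inv = 0
--         for c in s:
--             if c != STR:
--                 for d, k in cnt.items():
--                     if d > c:
--                         inv += k
--                 cnt[c] = cnt.get(c, 0) + 1
--         return inv % 2 == 1
--     n = len(str)
--     return inv_parity(str) == inv_parity(strTarget[:n])
-- ===== Notes on version B (the rewrite author's own statement) =====
-- stated objective: faster
-- what changed: Replaced the O(n^2) index double loop with one left-to-right pass per string that keeps a dict counting the non-'a' characters seen so far and adds the number of earlier greater characters for each new character (inversion parity via a running counter).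
import Mathlib
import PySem

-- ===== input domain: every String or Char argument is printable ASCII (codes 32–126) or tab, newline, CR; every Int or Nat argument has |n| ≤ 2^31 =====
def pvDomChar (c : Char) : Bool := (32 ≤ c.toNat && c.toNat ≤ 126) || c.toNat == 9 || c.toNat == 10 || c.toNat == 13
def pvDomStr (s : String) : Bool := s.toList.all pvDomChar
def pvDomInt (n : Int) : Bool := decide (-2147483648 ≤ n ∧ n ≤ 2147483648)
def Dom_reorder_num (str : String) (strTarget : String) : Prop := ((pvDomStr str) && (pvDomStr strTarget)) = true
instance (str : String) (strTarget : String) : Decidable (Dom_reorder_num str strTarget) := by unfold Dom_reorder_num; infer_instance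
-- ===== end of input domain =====

-- B replaces A's O(n²) index double loop by one pass per string keeping a counter dict
-- of the non-'a' characters seen so far (inversion parity via earlier-greater counts).

-- ===== PORT A =====
-- module constant STR = 'a' is inlined as the literal 'a'
-- (reorderNumInit, reorderNumTarget) is the pair state of the double loop;
-- n = len(str); the locals are inlined
def pvALoop (s t : List Char) (n : Int) : Int × Int :=
  (PySem.List.pyRange 0 n).foldl (fun (acc : Int × Int) i =>
    (PySem.List.pyRange (i + 1) n).foldl (fun (acc : Int × Int) j =>
      (if PySem.List.pyGetD s i ' ' ≠ 'a' ∧ PySem.List.pyGetD s j ' ' ≠ 'a' ∧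
          PySem.List.pyGetD s j ' ' < PySem.List.pyGetD s i ' ' then acc.1 + 1 else acc.1,
       if PySem.List.pyGetD t i ' ' ≠ 'a' ∧ PySem.List.pyGetD t j ' ' ≠ 'a' ∧
          PySem.List.pyGetD t j ' ' < PySem.List.pyGetD t i ' ' then acc.2 + 1 else acc.2))
      acc) ((0 : Int), (0 : Int))

def reorder_num (str : String) (strTarget : String) : Bool :=
  PySem.Int.mod (pvALoop str.toList strTarget.toList (str.toList.length : Int)).1 2 ==
    PySem.Int.mod (pvALoop str.toList strTarget.toList (str.toList.length : Int)).2 2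

-- ===== PORT B =====
-- sum of the counts of the dict entries whose character is greater than c
def pvSumGT (d : PySem.Dict Char Int) (c : Char) : Int :=
  d.items.foldl (fun a p => if c < p.1 then a + p.2 else a) 0

-- loop body of inv_parity: state = (cnt, inv)
def pvBstep (st : PySem.Dict Char Int × Int) (c : Char) : PySem.Dict Char Int × Int :=
  if c ≠ 'a' then (st.1.insert c (st.1.getD c 0 + 1), st.2 + pvSumGT st.1 c) else st

-- inv_parity(s): one pass with a character counter; returns inv % 2 == 1
def pvInvParity (s : List Char) : Bool :=
  PySem.Int.mod (s.foldl pvBstep (PySem.Dict.empty, (0 : Int))).2 2 == 1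

def reorder_num_alt (str : String) (strTarget : String) : Bool :=
  -- n = len(str); strTarget[:n]
  pvInvParity str.toList ==
    pvInvParity (PySem.List.slice strTarget.toList none (some (str.toList.length : Int)))

-- ===== PRECONDITION & SPEC =====
-- Pre_ excludes exactly the inputs where A raises IndexError indexing strTarget:
-- it reads strTarget[i] for every i < len(str)-1 and also strTarget[len(str)-1]
-- whenever some earlier strTarget[i] ≠ 'a' (the 'and' short-circuits on 'a').
def Pre_reorder_num (str : String) (strTarget : String) : Prop :=
  str.toList.length ≤ strTarget.toList.length ∨ str.toList.length < 2 ∨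
    (strTarget.toList.length + 1 = str.toList.length ∧ ∀ c ∈ strTarget.toList, c = 'a')
instance (str : String) (strTarget : String) : Decidable (Pre_reorder_num str strTarget) := by
  unfold Pre_reorder_num; infer_instance

def pvWitness_reorder_num : String × String := ("bc", "cb")

def Spec_reorder_num (str : String) (strTarget : String) (out : Bool) : Prop := out = reorder_num_alt str strTarget
instance (str : String) (strTarget : String) (out : Bool) : Decidable (Spec_reorder_num str strTarget out) := by unfold Spec_reorder_num; infer_instance

-- ===== CLAIM (what is proved, stated in full; the proofs are below) =====
def Claim_equal_reorder_num : Prop := ∀ (str : String) (strTarget : String), Dom_reorder_num str strTarget → Pre_reorder_num str strTarget → Spec_reorder_num str strTarget (reorder_num str strTarget)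


-- ===== LEMMAS AND PROOFS =====

-- the filter predicate "is not the ignored character 'a'"
def pvNotA (c : Char) : Bool := decide (c ≠ 'a')

-- number of inversions (later char strictly smaller), by head recursion
def pvInvLS : List Char → Nat
  | [] => 0
  | c :: cs => cs.countP (fun d => decide (d < c)) + pvInvLS cs

-- A's pair condition as a head recursion on the unfiltered list
def pvInvN : List Char → Nat
  | [] => 0
  | c :: cs => cs.countP (fun d => decide (c ≠ 'a' ∧ d ≠ 'a' ∧ d < c)) + pvInvN cs

-- running cross-count: for each non-'a' char, how many strictly greater chars precede it
def pvCross (p : List Char) : List Char → Int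
  | [] => 0
  | c :: s => if c = 'a' then pvCross p s
              else (p.countP (fun d => decide (c < d)) : Int) + pvCross (p ++ [c]) s

lemma pvFilter_cons_a (s : List Char) :
    (('a' :: s).filter pvNotA) = s.filter pvNotA := by
  simp [pvNotA]

lemma pvFilter_cons_ne {c : Char} (s : List Char) (hc : c ≠ 'a') :
    ((c :: s).filter pvNotA) = c :: s.filter pvNotA := by
  simp [pvNotA, hc]

lemma pvFoldl_id {β γ : Type} (l : List γ) (f : β → γ → β) (init : β)
    (h : ∀ a, ∀ x ∈ l, f a x = a) : l.foldl f init = init := by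
  induction l generalizing init with
  | nil => rfl
  | cons x xs ih =>
      simp only [List.foldl_cons, h init x (by simp)]
      exact ih _ (fun a y hy => h a y (by simp [hy]))

-- Prop-condition form of PySem.List.foldl_count_if
lemma pvFoldl_count_prop {P : Char → Prop} [DecidablePred P] (l : List Char) (a : Int) :
    l.foldl (fun acc c => if P c then acc + 1 else acc) a
      = a + (l.countP (fun c => decide (P c)) : Int) := by
  have h := PySem.List.foldl_count_if (fun c => decide (P c)) l a
  simpa using h

-- conditional-accumulate form of PySem.List.foldl_add
lemma pvFoldl_sum_if (l : List (Char × Int)) (c : Char) (a : Int) :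
    l.foldl (fun a p => if c < p.1 then a + p.2 else a) a
      = a + (l.map (fun p => if c < p.1 then p.2 else 0)).sum := by
  have h := PySem.List.foldl_add l (fun p => if c < p.1 then p.2 else 0) a
  rw [← h]
  exact PySem.List.foldl_congr_mem _ _ _ _ (by intro acc p _; split_ifs <;> simp)

lemma pvSumIndicator_zero (u : List Char) (x : Char) (w : Char → Int) (hx : x ∉ u) :
    (u.map (fun k => if k = x then w k else 0)).sum = 0 := by
  induction u with
  | nil => simp
  | cons k u ih =>
      simp only [List.map_cons, List.sum_cons]
      rw [if_neg (by rintro rfl; exact hx (by simp)), ih (fun h => hx (by simp [h]))]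
      simp

lemma pvSumIndicator (u : List Char) (x : Char) (w : Char → Int)
    (hnd : u.Nodup) (hx : x ∈ u) :
    (u.map (fun k => if k = x then w k else 0)).sum = w x := by
  induction u with
  | nil => simp at hx
  | cons k u ih =>
      simp only [List.map_cons, List.sum_cons]
      rcases List.mem_cons.mp hx with rfl | hx'
      · rw [if_pos rfl, pvSumIndicator_zero u _ w (List.nodup_cons.mp hnd).1]; simp
      · rw [if_neg (by rintro rfl; exact (List.nodup_cons.mp hnd).1 hx'),
            ih (List.nodup_cons.mp hnd).2 hx']
        simp

lemma pvSumCount (q : Char → Prop) [DecidablePred q] (u p : List Char)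
    (hnd : u.Nodup) (hsub : ∀ x ∈ p, x ∈ u) :
    (u.map (fun k => if q k then (p.count k : Int) else 0)).sum
      = (p.countP (fun d => decide (q d)) : Int) := by
  induction p with
  | nil => simp
  | cons x p ih =>
      have hx : x ∈ u := hsub x (by simp)
      have e : ∀ k ∈ u,
          (if q k then ((x :: p).count k : Int) else 0)
            = (if q k then (p.count k : Int) else 0)
              + (if k = x then (if q k then 1 else 0) else 0) := by
        intro k _
        by_cases hq : q k
        · by_cases hk : k = x
          · subst hk; simp [hq]
          · have hne : (x == k) = false := by
              simp only [beq_eq_false_iff_ne, ne_eq]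
              exact fun h => hk h.symm
            simp [hq, hk, List.count_cons, hne]
        · simp [hq]
      rw [List.map_congr_left e, PySem.List.sum_map_add_int,
          ih (fun y hy => hsub y (by simp [hy])),
          pvSumIndicator u x _ hnd hx, List.countP_cons]
      by_cases hq : q x <;> simp [hq]

-- sum over the counter dict = count over the processed prefix
lemma pvSumGT_counter (p : List Char) (c : Char) :
    pvSumGT (PySem.Dict.counter p) c = (p.countP (fun d => decide (c < d)) : Int) := by
  unfold pvSumGT
  rw [PySem.Dict.items_counter, pvFoldl_sum_if, List.map_map]
  simp only [Function.comp_def]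
  rw [pvSumCount (fun d => c < d) _ p (PySem.Set.nodup_ofList p)
        (fun x hx => (PySem.Set.mem_ofList p x).mpr hx)]
  simp

lemma pvCounter_snoc (p : List Char) (c : Char) :
    PySem.Dict.counter (p ++ [c])
      = (PySem.Dict.counter p).insert c ((PySem.Dict.counter p).getD c 0 + 1) := by
  rw [← PySem.Dict.foldl_insert_getD_add_one_eq_counter,
      ← PySem.Dict.foldl_insert_getD_add_one_eq_counter, List.foldl_append]
  rfl

lemma pvBfold (s : List Char) : ∀ (p : List Char) (inv0 : Int),
    s.foldl pvBstep (PySem.Dict.counter p, inv0)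
      = (PySem.Dict.counter (p ++ s.filter pvNotA), inv0 + pvCross p s) := by
  induction s with
  | nil => intro p inv0; simp [pvCross]
  | cons c s ih =>
      intro p inv0
      by_cases hc : c = 'a'
      · subst hc
        have hb : pvBstep (PySem.Dict.counter p, inv0) 'a' = (PySem.Dict.counter p, inv0) := by
          simp [pvBstep]
        rw [List.foldl_cons, hb, ih p inv0, pvFilter_cons_a]
        simp [pvCross]
      · have hb : pvBstep (PySem.Dict.counter p, inv0) c
            = (PySem.Dict.counter (p ++ [c]), inv0 + pvSumGT (PySem.Dict.counter p) c) := by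
          simp [pvBstep, hc, pvCounter_snoc]
        rw [List.foldl_cons, hb, ih (p ++ [c]), pvFilter_cons_ne s hc]
        simp only [pvCross, if_neg hc, pvSumGT_counter, List.append_assoc,
          List.singleton_append, add_assoc]

lemma pvCross_eq (s : List Char) : ∀ (p : List Char),
    pvCross p s
      = ((s.filter pvNotA).map
            (fun c => (p.countP (fun d => decide (c < d)) : Int))).sum
        + (pvInvLS (s.filter pvNotA) : Int) := by
  induction s with
  | nil => intro p; simp [pvCross, pvInvLS]
  | cons c s ih =>
      intro p
      by_cases hc : c = 'a'
      · subst hc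
        rw [pvFilter_cons_a]
        simp only [pvCross, reduceIte]
        exact ih p
      · rw [pvFilter_cons_ne s hc]
        simp only [pvCross, if_neg hc, List.map_cons, List.sum_cons, pvInvLS]
        rw [ih (p ++ [c])]
        have e : ∀ d ∈ s.filter pvNotA,
            (((p ++ [c]).countP (fun x => decide (d < x)) : Int))
              = (p.countP (fun x => decide (d < x)) : Int)
                + (if (fun x => decide (x < c)) d = true then (1:Int) else 0) := by
          intro d _; rw [List.countP_append]; simp [List.countP_cons]
        rw [List.map_congr_left e, PySem.List.sum_map_add_int,
            PySem.List.sum_map_ite_one_zero]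
        push_cast
        ring

-- pvInvParity computes the parity of the inversion count of the non-'a' subsequence
lemma pvInvParity_eq (s : List Char) :
    pvInvParity s
      = (PySem.Int.mod (pvInvLS (s.filter pvNotA) : Int) 2 == 1) := by
  unfold pvInvParity
  have h0 : (PySem.Dict.empty : PySem.Dict Char Int) = PySem.Dict.counter [] := rfl
  rw [h0, pvBfold s [] 0, pvCross_eq s []]
  simp [List.countP_nil]

-- ===== A-side =====

lemma pvSumRange (l : List Char) :
    ((List.range l.length).map (fun i =>
        ((l.drop (i+1)).countP (fun d =>
          decide (l.getD i ' ' ≠ 'a' ∧ d ≠ 'a' ∧ d < l.getD i ' ')) : Int))).sum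
      = (pvInvN l : Int) := by
  induction l with
  | nil => simp [pvInvN]
  | cons c cs ih =>
      rw [List.length_cons, List.range_succ_eq_map, List.map_cons, List.map_map,
          List.sum_cons]
      have e : ((List.range cs.length).map ((fun i =>
          (((c :: cs).drop (i+1)).countP (fun d =>
            decide ((c :: cs).getD i ' ' ≠ 'a' ∧ d ≠ 'a' ∧ d < (c :: cs).getD i ' ')) : Int))
            ∘ Nat.succ))
          = (List.range cs.length).map (fun i =>
            ((cs.drop (i+1)).countP (fun d =>
              decide (cs.getD i ' ' ≠ 'a' ∧ d ≠ 'a' ∧ d < cs.getD i ' ')) : Int)) := by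
        apply List.map_congr_left; intro i _; rfl
      rw [e, ih]
      simp [pvInvN]

-- the double loop of A on a single list, bound = its full length
lemma pvA_eq (l : List Char) :
    (PySem.List.pyRange 0 (l.length : Int)).foldl (fun (acc : Int) i =>
        (PySem.List.pyRange (i + 1) (l.length : Int)).foldl (fun a j =>
          if PySem.List.pyGetD l i ' ' ≠ 'a' ∧ PySem.List.pyGetD l j ' ' ≠ 'a' ∧
             PySem.List.pyGetD l j ' ' < PySem.List.pyGetD l i ' ' then a + 1 else a) acc) 0
      = (pvInvN l : Int) := by
  have hinner : ∀ (acc : Int), ∀ i ∈ PySem.List.pyRange 0 (l.length : Int),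
      (PySem.List.pyRange (i + 1) (l.length : Int)).foldl (fun a j =>
          if PySem.List.pyGetD l i ' ' ≠ 'a' ∧ PySem.List.pyGetD l j ' ' ≠ 'a' ∧
             PySem.List.pyGetD l j ' ' < PySem.List.pyGetD l i ' ' then a + 1 else a) acc
        = acc + ((l.drop (i+1).toNat).countP (fun d =>
            decide (PySem.List.pyGetD l i ' ' ≠ 'a' ∧ d ≠ 'a' ∧ d < PySem.List.pyGetD l i ' ')) : Int) := by
    intro acc i hi
    have h0 : (0:Int) ≤ i + 1 := by
      have := (PySem.List.mem_pyRange_one.mp hi).1; omega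
    rw [PySem.List.foldl_pyRange_pyGetD' l ' '
          (fun a c => if PySem.List.pyGetD l i ' ' ≠ 'a' ∧ c ≠ 'a' ∧
            c < PySem.List.pyGetD l i ' ' then a + 1 else a) acc h0,
        pvFoldl_count_prop]
  rw [PySem.List.foldl_congr_mem _ _
        (fun (acc : Int) i => acc + ((l.drop (i+1).toNat).countP (fun d =>
          decide (PySem.List.pyGetD l i ' ' ≠ 'a' ∧ d ≠ 'a' ∧ d < PySem.List.pyGetD l i ' ')) : Int))
        0 hinner,
      PySem.List.foldl_add, PySem.List.pyRange_zero_nat, List.map_map]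
  have e : ∀ k ∈ List.range l.length,
      ((fun i : Int => ((l.drop (i+1).toNat).countP (fun d =>
          decide (PySem.List.pyGetD l i ' ' ≠ 'a' ∧ d ≠ 'a' ∧ d < PySem.List.pyGetD l i ' ')) : Int))
        ∘ (fun k : Nat => (k : Int))) k
      = (fun i : Nat => ((l.drop (i+1)).countP (fun d =>
          decide (l.getD i ' ' ≠ 'a' ∧ d ≠ 'a' ∧ d < l.getD i ' ')) : Int)) k := by
    intro k hk
    have hk' : k < l.length := List.mem_range.mp hk
    have hget : PySem.List.pyGetD l (k : Int) ' ' = l.getD k ' ' := by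
      simp [PySem.List.pyGetD_natCast]
    have htn : ((k : Int) + 1).toNat = k + 1 := by omega
    simp only [Function.comp_apply, hget, htn]
  rw [List.map_congr_left e, pvSumRange]
  simp

lemma pvInvN_eq_filter (l : List Char) :
    pvInvN l = pvInvLS (l.filter pvNotA) := by
  induction l with
  | nil => rfl
  | cons c cs ih =>
      by_cases hc : c = 'a'
      · subst hc
        have h0 : cs.countP (fun d => decide (('a':Char) ≠ 'a' ∧ d ≠ 'a' ∧ d < 'a')) = 0 := by
          apply List.countP_eq_zero.mpr; intro d _; simp
        rw [pvFilter_cons_a]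
        simp only [pvInvN, h0, Nat.zero_add]
        exact ih
      · have h1 : cs.countP (fun d => decide (c ≠ 'a' ∧ d ≠ 'a' ∧ d < c))
            = (cs.filter pvNotA).countP (fun d => decide (d < c)) := by
          rw [List.countP_filter]
          apply List.countP_congr; intro d _
          simp [pvNotA, hc, and_comm]
        rw [pvFilter_cons_ne cs hc]
        simp only [pvInvN, h1, pvInvLS, ih]

lemma pvModCmp (a b : Int) :
    ((PySem.Int.mod a 2 : Int) == PySem.Int.mod b 2)
      = (((PySem.Int.mod a 2 : Int) == 1) == ((PySem.Int.mod b 2 : Int) == 1)) := by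
  rcases PySem.Int.mod_two_eq a with h | h <;>
    rcases PySem.Int.mod_two_eq b with h' | h' <;> rw [h, h'] <;> rfl

-- A's double loop on strTarget reads only indices < len(str): it is the loop on take n
lemma pvA_eq_take (t : List Char) (n : Nat) (h : n ≤ t.length) :
    (PySem.List.pyRange 0 (n : Int)).foldl (fun (acc : Int) i =>
        (PySem.List.pyRange (i + 1) (n : Int)).foldl (fun a j =>
          if PySem.List.pyGetD t i ' ' ≠ 'a' ∧ PySem.List.pyGetD t j ' ' ≠ 'a' ∧
             PySem.List.pyGetD t j ' ' < PySem.List.pyGetD t i ' ' then a + 1 else a) acc) 0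
      = (pvInvN (t.take n) : Int) := by
  have hl : (t.take n).length = n := by simp [List.length_take]; omega
  have hget : ∀ i : Int, 0 ≤ i → i < (n : Int) →
      PySem.List.pyGetD t i ' ' = PySem.List.pyGetD (t.take n) i ' ' := by
    intro i h0 h1
    rw [PySem.List.pyGetD_eq_getElem t ' ' h0 (by omega),
        PySem.List.pyGetD_eq_getElem (t.take n) ' ' h0 (by rw [hl]; omega)]
    exact List.getElem_take.symm
  have := pvA_eq (t.take n)
  rw [hl] at this
  rw [← this]
  apply PySem.List.foldl_congr_mem
  intro acc i hi
  obtain ⟨hi0, hi1⟩ := PySem.List.mem_pyRange_one.mp hi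
  apply PySem.List.foldl_congr_mem
  intro a j hj
  obtain ⟨hj0, hj1⟩ := PySem.List.mem_pyRange_one.mp hj
  rw [hget i hi0 hi1, hget j (by omega) hj1]

-- value of the second counter when strTarget is all-'a' of length len(str)-1
lemma pvAllA (t : List Char) (n : Nat) (h : t.length + 1 = n)
    (hall : ∀ c ∈ t, c = 'a') :
    (PySem.List.pyRange 0 (n : Int)).foldl (fun (acc : Int) i =>
        (PySem.List.pyRange (i + 1) (n : Int)).foldl (fun a j =>
          if PySem.List.pyGetD t i ' ' ≠ 'a' ∧ PySem.List.pyGetD t j ' ' ≠ 'a' ∧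
             PySem.List.pyGetD t j ' ' < PySem.List.pyGetD t i ' ' then a + 1 else a) acc) 0
      = 0 := by
  apply pvFoldl_id
  intro acc i hi
  obtain ⟨hi0, hi1⟩ := PySem.List.mem_pyRange_one.mp hi
  by_cases hlast : (t.length : Int) ≤ i
  · rw [PySem.List.pyRange_one_eq_nil (by omega)]
    rfl
  · have hia : PySem.List.pyGetD t i ' ' = 'a' := by
      rw [PySem.List.pyGetD_eq_getElem t ' ' hi0 (by omega)]
      exact hall _ (List.getElem_mem _)
    apply pvFoldl_id
    intro a j _
    rw [if_neg (by rw [hia]; simp)]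

-- the double loop with two independent counters is the pair of the single-counter loops
lemma pvPairSplit (n : Int) (P Q : Int → Int → Prop)
    [inst1 : ∀ i j, Decidable (P i j)] [inst2 : ∀ i j, Decidable (Q i j)] :
    (PySem.List.pyRange 0 n).foldl (fun (acc : Int × Int) i =>
        (PySem.List.pyRange (i + 1) n).foldl (fun (acc : Int × Int) j =>
          (if P i j then acc.1 + 1 else acc.1,
           if Q i j then acc.2 + 1 else acc.2)) acc) ((0 : Int), (0 : Int))
      = ((PySem.List.pyRange 0 n).foldl (fun (acc : Int) i =>
            (PySem.List.pyRange (i + 1) n).foldl (fun a j =>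
              if P i j then a + 1 else a) acc) 0,
         (PySem.List.pyRange 0 n).foldl (fun (acc : Int) i =>
            (PySem.List.pyRange (i + 1) n).foldl (fun a j =>
              if Q i j then a + 1 else a) acc) 0) := by
  rw [PySem.List.foldl_congr_mem _ _
        (fun (acc : Int × Int) i =>
          ((PySem.List.pyRange (i + 1) n).foldl (fun a j => if P i j then a + 1 else a) acc.1,
           (PySem.List.pyRange (i + 1) n).foldl (fun a j => if Q i j then a + 1 else a) acc.2))
        ((0 : Int), (0 : Int))
        (by
          rintro ⟨a, b⟩ i _
          exact PySem.List.foldl_prod_mk (fun a j => if P i j then a + 1 else a)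
            (fun b j => if Q i j then b + 1 else b) _ a b)]
  exact PySem.List.foldl_prod_mk
    (fun (acc : Int) i => (PySem.List.pyRange (i + 1) n).foldl
      (fun a j => if P i j then a + 1 else a) acc)
    (fun (acc : Int) i => (PySem.List.pyRange (i + 1) n).foldl
      (fun a j => if Q i j then a + 1 else a) acc)
    (PySem.List.pyRange 0 n) 0 0

-- ===== VERDICT (by name: the statement is the Claim_ definition above) =====
theorem reorder_num_spec : Claim_equal_reorder_num := by
  intro str strTarget _ hpre
  unfold Spec_reorder_num reorder_num reorder_num_alt pvALoop
  rw [pvPairSplit]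
  rw [pvA_eq str.toList, pvInvParity_eq str.toList, ← pvInvN_eq_filter str.toList]
  rcases hpre with h | h | ⟨h1, h2⟩
  · -- main case: len(str) ≤ len(strTarget)
    rw [pvA_eq_take strTarget.toList str.toList.length h,
        PySem.List.slice_to_natCast strTarget.toList str.toList.length,
        pvInvParity_eq, ← pvInvN_eq_filter]
    exact pvModCmp _ _
  · -- len(str) < 2 and (if not covered above) strTarget arbitrary
    by_cases hle : str.toList.length ≤ strTarget.toList.length
    · rw [pvA_eq_take strTarget.toList str.toList.length hle,
          PySem.List.slice_to_natCast strTarget.toList str.toList.length,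
          pvInvParity_eq, ← pvInvN_eq_filter]
      exact pvModCmp _ _
    · -- then len(str) = 1 and strTarget = ""
      have ht : strTarget.toList = [] := List.length_eq_zero_iff.mp (by omega)
      have hs : str.toList.length = 1 := by omega
      obtain ⟨c, hc⟩ := List.length_eq_one_iff.mp hs
      rw [hc, ht]
      simp only [List.length_singleton, Nat.cast_one,
        show PySem.List.pyRange (0:Int) 1 = [0] from rfl,
        show PySem.List.pyRange ((0:Int)+1) 1 = [] from rfl,
        List.foldl_cons, List.foldl_nil]
      rw [show pvInvN [c] = 0 from rfl]
      decide
  · -- strTarget all-'a' of length len(str) - 1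
    rw [pvAllA strTarget.toList str.toList.length h1 h2,
        PySem.List.slice_to_natCast strTarget.toList str.toList.length,
        List.take_of_length_le (by omega), pvInvParity_eq]
    have hf : strTarget.toList.filter pvNotA = [] := by
      apply List.filter_eq_nil_iff.mpr
      intro a ha; simp [pvNotA, h2 a ha]
    rw [hf]
    have h0 : ((0:Nat) : Int) = (0:Int) := rfl
    rw [show (0:Int) = ((0:Nat) : Int) from rfl]
    exact pvModCmp _ 0
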